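-- pv_equiv track=rewrite | github.com/pisterlabs/promptset | data/scraping/repos/davidwaldherr~UniversalSummarier/1_Universal.py | startTable
-- ===== SOURCE A (Python) =====
-- def startTable(text):
--     table = []
--     start = 0
--     end = 0
--     for i in range(len(text)):
--         if text[i] == 'start':
--             if start == 0:
--                 table.append('2')
--                 start = 1
--             else:
--                 table.append('1')
--         elif text[i] == 'end':
--             if end == 0:
--                 table.append('2')
--                 end = 1
--             else:
--                 table.append('1')
--         elif text[i] == '':
--             table.append('0')
--         # elif text[i] == '• • •':
--         #     table.append('0')
--         else:
--             table.append('1')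
--     return table
-- ===== SOURCE B (Python) =====
-- def startTable(text):
--     # Stage 1: pure per-token map ('' -> '0', everything else -> '1');
--     # Stage 2: patch the first occurrence of 'start' and of 'end' to '2'.
--     table = ['0' if tok == '' else '1' for tok in text]
--     for word in ('start', 'end'):
--         if word in text:
--             table[text.index(word)] = '2'
--     return table
-- ===== Notes on version B (the rewrite author's own statement) =====
-- stated objective: alternative
-- what changed: Replaces A's single stateful scan (two running seen-flags deciding '2' per element) with a stage decomposition: a pure map that knows nothing about 'start'/'end' ('' -> '0', else '1'), followed by two point-patches that overwrite the first occurrence of 'start' and of 'end' with '2'.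
import Mathlib
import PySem

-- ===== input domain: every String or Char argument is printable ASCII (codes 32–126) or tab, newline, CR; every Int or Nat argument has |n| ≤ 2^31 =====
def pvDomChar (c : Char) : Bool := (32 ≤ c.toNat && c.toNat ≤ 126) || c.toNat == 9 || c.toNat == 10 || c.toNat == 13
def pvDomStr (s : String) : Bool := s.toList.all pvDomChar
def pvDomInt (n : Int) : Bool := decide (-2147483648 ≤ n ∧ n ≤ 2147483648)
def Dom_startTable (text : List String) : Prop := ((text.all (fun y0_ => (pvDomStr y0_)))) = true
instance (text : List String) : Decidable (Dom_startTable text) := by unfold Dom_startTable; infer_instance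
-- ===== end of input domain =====

-- B replaces A's stateful flag-scan by a pure map ('' -> '0', else '1') followed by two
-- point-patches writing '2' at the first occurrence of 'start' and of 'end' (alternative decomposition, same cost).

-- ===== PORT A =====
-- A's loop over text with the two int flags `start`, `end`, building the table front-to-back.
def startTableGo : List String → Int → Int → List String
  | [], _, _ => []
  | t :: ts, s, e =>
    if t == "start" then
      if s == 0 then "2" :: startTableGo ts 1 e else "1" :: startTableGo ts s e
    else if t == "end" then
      if e == 0 then "2" :: startTableGo ts s 1 else "1" :: startTableGo ts s e
    else if t == "" then "0" :: startTableGo ts s e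
    else "1" :: startTableGo ts s e

def startTable (text : List String) : List String := startTableGo text 0 0

-- ===== PORT B =====
-- stage 1: per-token map, with no knowledge of 'start'/'end'
def classifyB (t : String) : String := if t == "" then "0" else "1"

-- stage 2: one point-patch — write "2" at the first occurrence of `w` in `text`, if any
def patchFirst (text : List String) (table : List String) (w : String) : List String :=
  match PySem.List.index? text w with
  | some n => table.set n "2"
  | none => table

def startTable_alt (text : List String) : List String :=
  ["start", "end"].foldl (patchFirst text) (text.map classifyB)

-- ===== PRECONDITION & SPEC =====
def Spec_startTable (text : List String) (out : List String) : Prop := out = startTable_alt text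
instance (text : List String) (out : List String) : Decidable (Spec_startTable text out) := by unfold Spec_startTable; infer_instance

-- ===== CLAIM =====
def Claim_equal_startTable : Prop := ∀ (text : List String), Dom_startTable text → Spec_startTable text (startTable text)

-- ===== LEMMAS AND PROOFS =====

/-- Proof-side characterisation: the cell at (Int) index `i` holding token `t`,
given the first-occurrence indices `fs`, `fe` (-1 = absent). -/
def cellB (fs fe : Int) (p : Int × String) : String :=
  if p.2 == "start" then (if p.1 == fs then "2" else "1")
  else if p.2 == "end" then (if p.1 == fe then "2" else "1")
  else if p.2 == "" then "0"
  else "1"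

/-- First index of `v` in `ts`, offset by `k`; -1 if absent. -/
def firstFrom (v : String) (k : Int) (ts : List String) : Int :=
  match PySem.List.index? ts v with | some n => k + (n : Int) | none => -1

theorem firstFrom_cons_self (v : String) (k : Int) (ts : List String) :
    firstFrom v k (v :: ts) = k := by
  unfold firstFrom
  rw [PySem.List.index?_cons_self]
  simp

theorem firstFrom_cons_ne {t v : String} (h : t ≠ v) (k : Int) (ts : List String) :
    firstFrom v k (t :: ts) = firstFrom v (k + 1) ts := by
  unfold firstFrom
  rw [PySem.List.index?_cons_of_ne _ h]
  cases PySem.List.index? ts v with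
  | none => rfl
  | some n =>
    simp only [Option.map_some]
    push_cast
    ring

theorem go_eq (ts : List String) (k s e fs fe : Int)
    (hfs0 : s = 0 → fs = firstFrom "start" k ts) (hfs1 : s ≠ 0 → fs < k)
    (hfe0 : e = 0 → fe = firstFrom "end" k ts) (hfe1 : e ≠ 0 → fe < k) :
    startTableGo ts s e = (PySem.List.enumerate ts k).map (cellB fs fe) := by
  induction ts generalizing k s e with
  | nil => simp [startTableGo, PySem.List.enumerate]
  | cons t ts ih =>
    rw [PySem.List.enumerate_cons, List.map_cons]
    by_cases hst : t = "start"
    · subst hst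
      simp only [startTableGo, beq_self_eq_true, if_true]
      by_cases hs : s = 0
      · have hfsk : fs = k := by rw [hfs0 hs, firstFrom_cons_self]
        rw [if_pos (by simpa using hs)]
        refine congrArg₂ List.cons ?_
          (ih (k + 1) 1 e (fun h => absurd h one_ne_zero) (fun _ => by omega)
            (fun he => by rw [hfe0 he, firstFrom_cons_ne (by decide)])
            (fun he => by have := hfe1 he; omega))
        simp [cellB, hfsk]
      · have hne : ((k : Int) == fs) = false := beq_eq_false_iff_ne.mpr (by have := hfs1 hs; omega)
        rw [if_neg (by simpa using hs)]
        refine congrArg₂ List.cons ?_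
          (ih (k + 1) s e (fun h => absurd h hs) (fun _ => by have := hfs1 hs; omega)
            (fun he => by rw [hfe0 he, firstFrom_cons_ne (by decide)])
            (fun he => by have := hfe1 he; omega))
        simp [cellB, hne]
    · have e1 : (t == "start") = false := by simpa using hst
      by_cases hen : t = "end"
      · subst hen
        simp only [startTableGo, cellB, e1, Bool.false_eq_true, if_false, beq_self_eq_true, if_true]
        by_cases he : e = 0
        · have hfek : fe = k := by rw [hfe0 he, firstFrom_cons_self]
          rw [if_pos (by simpa using he)]
          refine congrArg₂ List.cons ?_
            (ih (k + 1) s 1 (fun hsz => by rw [hfs0 hsz, firstFrom_cons_ne (by decide)])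
              (fun hsz => by have := hfs1 hsz; omega)
              (fun h => absurd h one_ne_zero) (fun _ => by omega))
          simp [hfek]
        · have hne : ((k : Int) == fe) = false := beq_eq_false_iff_ne.mpr (by have := hfe1 he; omega)
          rw [if_neg (by simpa using he)]
          refine congrArg₂ List.cons ?_
            (ih (k + 1) s e (fun hsz => by rw [hfs0 hsz, firstFrom_cons_ne (by decide)])
              (fun hsz => by have := hfs1 hsz; omega)
              (fun h => absurd h he) (fun _ => by have := hfe1 he; omega))
          simp [hne]
      · have e2 : (t == "end") = false := by simpa using hen
        have ihx := ih (k + 1) s e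
          (fun hsz => by rw [hfs0 hsz, firstFrom_cons_ne hst])
          (fun hsz => by have := hfs1 hsz; omega)
          (fun hez => by rw [hfe0 hez, firstFrom_cons_ne hen])
          (fun hez => by have := hfe1 hez; omega)
        by_cases hem : t = ""
        · subst hem
          simp only [startTableGo, cellB, e1, e2, Bool.false_eq_true, if_false,
            beq_self_eq_true, if_true]
          exact congrArg _ ihx
        · have e3 : (t == "") = false := by simpa using hem
          simp only [startTableGo, cellB, e1, e2, e3, Bool.false_eq_true, if_false]
          exact congrArg _ ihx

/-- B's map-then-patch pipeline equals the pointwise `cellB` characterisation. -/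
theorem alt_eq (text : List String) :
    startTable_alt text =
      (PySem.List.enumerate text 0).map
        (cellB (firstFrom "start" 0 text) (firstFrom "end" 0 text)) := by
  unfold startTable_alt
  simp only [List.foldl_cons, List.foldl_nil]
  cases hS : PySem.List.index? text "start" with
  | none =>
    have hSn : "start" ∉ text := (PySem.List.index?_eq_none_iff text "start").mp hS
    have hfs : firstFrom "start" 0 text = -1 := by unfold firstFrom; rw [hS]
    cases hE : PySem.List.index? text "end" with
    | none =>
      have hEn : "end" ∉ text := (PySem.List.index?_eq_none_iff text "end").mp hE
      have hfe : firstFrom "end" 0 text = -1 := by unfold firstFrom; rw [hE]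
      simp only [patchFirst, hS, hE]
      apply List.ext_getElem
      · simp [PySem.List.length_enumerate]
      · intro i h1 h2
        have hi : i < text.length := by simpa using h1
        have htS : text[i] ≠ "start" := fun h => hSn (h ▸ List.getElem_mem hi)
        have htE : text[i] ≠ "end" := fun h => hEn (h ▸ List.getElem_mem hi)
        rw [List.getElem_map, List.getElem_map, PySem.List.getElem_enumerate]
        simp [cellB, classifyB, htS, htE]
    | some m =>
      obtain ⟨hm, hem, _⟩ := PySem.List.getElem_of_index?_eq_some hE
      have hfe : firstFrom "end" 0 text = (m : Int) := by unfold firstFrom; rw [hE]; simp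
      simp only [patchFirst, hS, hE]
      apply List.ext_getElem
      · simp [PySem.List.length_enumerate]
      · intro i h1 h2
        have hi : i < text.length := by simpa using h1
        have htS : text[i] ≠ "start" := fun h => hSn (h ▸ List.getElem_mem hi)
        rw [List.getElem_map, PySem.List.getElem_enumerate, List.getElem_set]
        by_cases him : m = i
        · subst him
          simp [cellB, hem, hfe]
        · have hBm : ((i : Int) == (m : Int)) = false := by
            simp only [beq_eq_false_iff_ne]; exact_mod_cast Ne.symm him
          rw [List.getElem_map]
          by_cases htE : text[i] = "end"
          · have him' : ¬ i = m := fun h => him h.symm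
            simp only [cellB, htE, hfe, classifyB]
            simp [him, him']
          · simp [cellB, classifyB, htS, htE, him]
  | some n =>
    obtain ⟨hn, hsn, _⟩ := PySem.List.getElem_of_index?_eq_some hS
    have hfs : firstFrom "start" 0 text = (n : Int) := by unfold firstFrom; rw [hS]; simp
    cases hE : PySem.List.index? text "end" with
    | none =>
      have hEn : "end" ∉ text := (PySem.List.index?_eq_none_iff text "end").mp hE
      have hfe : firstFrom "end" 0 text = -1 := by unfold firstFrom; rw [hE]
      simp only [patchFirst, hS, hE]
      apply List.ext_getElem
      · simp [PySem.List.length_enumerate]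
      · intro i h1 h2
        have hi : i < text.length := by simpa using h1
        have htE : text[i] ≠ "end" := fun h => hEn (h ▸ List.getElem_mem hi)
        rw [List.getElem_map, PySem.List.getElem_enumerate, List.getElem_set]
        by_cases hin : n = i
        · subst hin
          simp [cellB, hsn, hfs]
        · have hBn : ((i : Int) == (n : Int)) = false := by
            simp only [beq_eq_false_iff_ne]; exact_mod_cast Ne.symm hin
          rw [List.getElem_map]
          by_cases htS : text[i] = "start"
          · simp [cellB, classifyB, htS, hfs, hin, hBn]
          · simp [cellB, classifyB, htS, htE, hin]
    | some m =>
      obtain ⟨hm, hem, _⟩ := PySem.List.getElem_of_index?_eq_some hE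
      have hfe : firstFrom "end" 0 text = (m : Int) := by unfold firstFrom; rw [hE]; simp
      simp only [patchFirst, hS, hE]
      apply List.ext_getElem
      · simp [PySem.List.length_enumerate]
      · intro i h1 h2
        have hi : i < text.length := by simpa using h1
        rw [List.getElem_map, PySem.List.getElem_enumerate, List.getElem_set, List.getElem_set]
        by_cases him : m = i
        · subst him
          simp [cellB, hem, hfe]
        · have hBm : ((i : Int) == (m : Int)) = false := by
            simp only [beq_eq_false_iff_ne]; exact_mod_cast Ne.symm him
          by_cases hin : n = i
          · subst hin
            simp [cellB, hsn, hfs, him]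
          · have hBn : ((i : Int) == (n : Int)) = false := by
              simp only [beq_eq_false_iff_ne]; exact_mod_cast Ne.symm hin
            rw [List.getElem_map]
            by_cases htS : text[i] = "start"
            · simp [cellB, classifyB, htS, hfs, him, hin, hBn]
            · by_cases htE : text[i] = "end"
              · simp [cellB, classifyB, htE, hfe, him, hin, hBm]
              · simp [cellB, classifyB, htS, htE, him, hin]

-- ===== VERDICT =====
theorem startTable_spec : Claim_equal_startTable := by
  intro text _
  unfold Spec_startTable startTable
  rw [alt_eq,
    go_eq text 0 0 0 (firstFrom "start" 0 text) (firstFrom "end" 0 text)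
      (fun _ => rfl) (fun h => absurd rfl h) (fun _ => rfl) (fun h => absurd rfl h)]
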